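-- pv_equiv track=rewrite | github.com/WoutDeRijck/AttentionSentiment | app.py | _build_inside_tag_mask
-- ===== SOURCE A (Python) =====
-- def _build_inside_tag_mask(text: str):
--     """Return a boolean list per character: True if inside <...> HTML-like tag."""
--     inside = False
--     mask = []
--     for ch in text:
--         if ch == '<':
--             inside = True
--         mask.append(inside)
--         if ch == '>':
--             inside = False
--     return mask
-- ===== SOURCE B (Python) =====
-- def _build_inside_tag_mask(text: str):
--     """Span-filling version: jump between tag delimiters with str.find and emit the mask in blocks."""
--     n = len(text)
--     out = []
--     i = 0
--     while i < n:
--         start = text.find('<', i)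
--         if start == -1:
--             out.extend([False] * (n - i))
--             break
--         end = text.find('>', start)
--         if end == -1:
--             end = n - 1
--         out.extend([False] * (start - i))
--         out.extend([True] * (end + 1 - start))
--         i = end + 1
--     return out
-- ===== Notes on version B (the rewrite author's own statement) =====
-- stated objective: alternative
-- what changed: Replaces A's per-character boolean-flag fold with a loop that jumps between tag delimiters via str.find and emits the mask in False/True blocks.
import Mathlib
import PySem

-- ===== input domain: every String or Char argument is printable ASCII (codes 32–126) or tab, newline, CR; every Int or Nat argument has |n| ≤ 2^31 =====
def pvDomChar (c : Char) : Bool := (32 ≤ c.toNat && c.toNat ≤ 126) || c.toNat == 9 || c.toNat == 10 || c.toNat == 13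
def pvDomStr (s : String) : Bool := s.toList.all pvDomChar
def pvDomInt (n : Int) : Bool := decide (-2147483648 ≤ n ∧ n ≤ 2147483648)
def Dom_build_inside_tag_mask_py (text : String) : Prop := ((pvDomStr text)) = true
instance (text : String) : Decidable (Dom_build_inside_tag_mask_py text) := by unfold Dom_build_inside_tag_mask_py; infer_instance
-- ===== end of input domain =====

-- B replaces A's per-character boolean-flag scan by str.find jumps between tag
-- delimiters, emitting the mask in blocks (objective: alternative decomposition).

-- ===== PORT A =====
-- literal transliteration of A's char loop carrying (inside, mask)
def build_inside_tag_mask_py (text : String) : List Bool :=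
  (text.toList.foldl
    (fun (st : Bool × List Bool) ch =>
      let inside := if ch == '<' then true else st.1
      let mask := st.2 ++ [inside]
      (if ch == '>' then false else inside, mask))
    (false, [])).2

-- ===== PORT B =====
-- Source B's while loop, fuel-bounded for totality (fuel s.length+1 is always enough:
-- i strictly increases each iteration); find → PySem.Chars.findFrom (exact).
def altGo (fuel : Nat) (s : List Char) (i : Nat) (out : List Bool) : List Bool :=
  match fuel with
  | 0 => out
  | fuel + 1 =>
    if i < s.length then
      let start := PySem.Chars.findFrom s ['<'] (i : Int) none
      if start = -1 then out ++ List.replicate (s.length - i) false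
      else
        let e0 := PySem.Chars.findFrom s ['>'] start none
        let e : Int := if e0 = -1 then (s.length : Int) - 1 else e0
        altGo fuel s (e + 1).toNat
          (out ++ List.replicate (start - (i : Int)).toNat false
               ++ List.replicate (e + 1 - start).toNat true)
    else out

def build_inside_tag_mask_py_alt (text : String) : List Bool :=
  altGo (text.toList.length + 1) text.toList 0 []

-- ===== PRECONDITION & SPEC =====
def Spec_build_inside_tag_mask_py (text : String) (out : List Bool) : Prop := out = build_inside_tag_mask_py_alt text
instance (text : String) (out : List Bool) : Decidable (Spec_build_inside_tag_mask_py text out) := by unfold Spec_build_inside_tag_mask_py; infer_instance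

-- ===== CLAIM (what is proved, stated in full; the proofs are below) =====
def Claim_equal_build_inside_tag_mask_py : Prop := ∀ (text : String), Dom_build_inside_tag_mask_py text → Spec_build_inside_tag_mask_py text (build_inside_tag_mask_py text)

-- ===== LEMMAS AND PROOFS =====

-- recursive characterization of A's scan (proof-only helper)
def maskF : Bool → List Char → List Bool
  | _, [] => []
  | inside, c :: cs =>
    let ins := if c == '<' then true else inside
    ins :: maskF (if c == '>' then false else ins) cs

lemma foldl_eq_maskF (l : List Char) : ∀ (inside : Bool) (acc : List Bool),
    (l.foldl
      (fun (st : Bool × List Bool) ch =>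
        let inside := if ch == '<' then true else st.1
        let mask := st.2 ++ [inside]
        (if ch == '>' then false else inside, mask))
      (inside, acc)).2 = acc ++ maskF inside l := by
  induction l with
  | nil => intro inside acc; simp [maskF]
  | cons c cs ih =>
    intro inside acc
    simp only [List.foldl_cons, maskF, ih]
    simp

lemma singleton_infix_iff {c : Char} {l : List Char} : [c] <:+: l ↔ c ∈ l := by
  constructor
  · intro h
    exact (List.singleton_sublist).1 h.sublist
  · intro h
    obtain ⟨s, t, rfl⟩ := List.append_of_mem h
    exact ⟨s, t, by simp⟩

lemma find_eq_neg_one_char {c : Char} {l : List Char}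
    (h : PySem.Chars.find l [c] = -1) : c ∉ l := by
  have := (PySem.Chars.find_eq_neg_one_iff l [c]).1 h
  exact fun hm => this (singleton_infix_iff.2 hm)

lemma find_char_decomp {c : Char} {l : List Char}
    (h : PySem.Chars.find l [c] ≠ -1) :
    ∃ p q, l = p ++ c :: q ∧ (p.length : Int) = PySem.Chars.find l [c] ∧ c ∉ p := by
  have hspec := PySem.Chars.findFrom_natCast_spec l [c] 0 (Nat.zero_le _)
  simp only [Nat.cast_zero, PySem.Chars.findFrom_zero] at hspec
  obtain ⟨-, hpre, hmin⟩ := hspec h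
  have hnn : 0 ≤ PySem.Chars.find l [c] :=
    (PySem.Chars.find_nonneg_iff l [c]).2 ((PySem.Chars.find_ne_neg_one_iff l [c]).1 h)
  set j := (PySem.Chars.find l [c]).toNat with hj
  obtain ⟨t, ht⟩ := hpre
  simp only [List.singleton_append] at ht
  have hjlt : j < l.length := by
    by_contra hle
    have : l.drop j = [] := List.drop_eq_nil_of_le (by omega)
    rw [this] at ht; exact (List.cons_ne_nil c t) ht
  refine ⟨l.take j, t, ?_, ?_, ?_⟩
  · conv_lhs => rw [← List.take_append_drop j l]
    rw [← ht]
  · rw [List.length_take]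
    have hm : min j l.length = j := by omega
    rw [hm, hj]; exact Int.toNat_of_nonneg hnn
  · intro hm
    obtain ⟨t0, ht0lt, ht0⟩ := List.mem_iff_getElem.1 hm
    rw [List.length_take] at ht0lt
    have ht0j : t0 < j := lt_of_lt_of_le ht0lt (min_le_left _ _)
    have ht0l : t0 < l.length := lt_trans ht0j hjlt
    apply hmin t0 (Nat.zero_le _) ht0j
    have hgl : l[t0] = c := by simpa [List.getElem_take] using ht0
    refine ⟨l.drop (t0 + 1), ?_⟩
    rw [List.singleton_append, ← hgl]
    exact (List.drop_eq_getElem_cons ht0l).symm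

-- no '<' anywhere: all False
lemma maskF_false_no_lt : ∀ (l : List Char), '<' ∉ l →
    maskF false l = List.replicate l.length false := by
  intro l
  induction l with
  | nil => intro _; simp [maskF]
  | cons c cs ih =>
    intro h
    have hc : (c == '<') = false := by
      simp only [beq_eq_false_iff_ne]; intro he; exact h (he ▸ List.mem_cons_self ..)
    simp [maskF, hc, ih (fun hm => h (List.mem_cons_of_mem _ hm)), List.replicate_succ]

lemma maskF_false_append : ∀ (p l : List Char), '<' ∉ p →
    maskF false (p ++ l) = List.replicate p.length false ++ maskF false l := by
  intro p
  induction p with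
  | nil => intro l _; simp
  | cons c cs ih =>
    intro l h
    have hc : (c == '<') = false := by
      simp only [beq_eq_false_iff_ne]; intro he; exact h (he ▸ List.mem_cons_self ..)
    simp [maskF, hc, ih l (fun hm => h (List.mem_cons_of_mem _ hm)), List.replicate_succ]

lemma maskF_true_no_gt : ∀ (l : List Char), '>' ∉ l →
    maskF true l = List.replicate l.length true := by
  intro l
  induction l with
  | nil => intro _; simp [maskF]
  | cons c cs ih =>
    intro h
    have hc : (c == '>') = false := by
      simp only [beq_eq_false_iff_ne]; intro he; exact h (he ▸ List.mem_cons_self ..)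
    simp [maskF, hc, ih (fun hm => h (List.mem_cons_of_mem _ hm)), List.replicate_succ]

lemma maskF_true_append : ∀ (q r : List Char), '>' ∉ q →
    maskF true (q ++ '>' :: r) = List.replicate q.length true ++ (true :: maskF false r) := by
  intro q
  induction q with
  | nil => intro r _; simp [maskF]
  | cons c cs ih =>
    intro r h
    have hc : (c == '>') = false := by
      simp only [beq_eq_false_iff_ne]; intro he; exact h (he ▸ List.mem_cons_self ..)
    simp [maskF, hc, ih r (fun hm => h (List.mem_cons_of_mem _ hm)), List.replicate_succ]

lemma cons_replicate_comm (n : Nat) (M : List Bool) :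
    true :: (List.replicate n true ++ M) = List.replicate n true ++ true :: M := by
  induction n with
  | zero => simp
  | succ n ih => simp [List.replicate_succ, ih]

lemma altGo_eq : ∀ (fuel : Nat) (s : List Char) (i : Nat) (out : List Bool),
    s.length - i < fuel → altGo fuel s i out = out ++ maskF false (s.drop i) := by
  intro fuel
  induction fuel with
  | zero => intro s i out h; omega
  | succ fuel ih =>
    intro s i out h
    simp only [altGo]
    by_cases hi : i < s.length
    · simp only [if_pos hi]
      rw [PySem.Chars.findFrom_natCast s ['<'] i hi.le]
      by_cases hf : PySem.Chars.find (s.drop i) ['<'] = -1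
      · simp only [if_pos hf, if_true]
        rw [maskF_false_no_lt _ (find_eq_neg_one_char hf), List.length_drop]
      · obtain ⟨p, q, hdec, hplen, hpnot⟩ := find_char_decomp hf
        have hlen : s.length - i = p.length + 1 + q.length := by
          have h0 : (s.drop i).length = (p ++ '<' :: q).length := by rw [hdec]
          simp at h0; omega
        have hnn : (0:ℤ) ≤ PySem.Chars.find (s.drop i) ['<'] := by
          rw [← hplen]; exact Int.natCast_nonneg _
        have hne : ¬ ((i:ℤ) + PySem.Chars.find (s.drop i) ['<'] = -1) := by omega
        simp only [if_neg hf, if_neg hne]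
        have hstart : (i:ℤ) + PySem.Chars.find (s.drop i) ['<'] = ((i + p.length : ℕ) : ℤ) := by
          rw [← hplen]; push_cast; ring
        rw [hstart]
        have hJlt : i + p.length < s.length := by omega
        rw [PySem.Chars.findFrom_natCast s ['>'] (i + p.length) hJlt.le]
        have hdropJ : s.drop (i + p.length) = '<' :: q := by
          rw [← List.drop_drop, hdec, List.drop_left]
        rw [hdropJ]
        -- RHS skeleton
        rw [hdec, maskF_false_append p _ hpnot]
        have hmlt : maskF false ('<' :: q) = true :: maskF true q := by
          simp [maskF]
        by_cases hg : PySem.Chars.find ('<' :: q) ['>'] = -1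
        · simp only [if_pos hg, if_true]
          have e1 : ((s.length:ℤ) - 1 + 1).toNat = s.length := by omega
          have e2 : (((i + p.length : ℕ):ℤ) - (i:ℤ)).toNat = p.length := by push_cast; omega
          have e3 : ((s.length:ℤ) - 1 + 1 - ((i + p.length : ℕ):ℤ)).toNat = q.length + 1 := by
            push_cast; omega
          rw [e1, e2, e3, ih s s.length _ (by omega), List.drop_length]
          have hq : '>' ∉ q := fun hm =>
            (find_eq_neg_one_char hg) (List.mem_cons_of_mem _ hm)
          rw [hmlt, maskF_true_no_gt q hq]
          simp [maskF, List.replicate_succ, List.append_assoc]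
        · obtain ⟨p2, r, hdec2, hp2len, hp2not⟩ := find_char_decomp hg
          have hnn2 : (0:ℤ) ≤ PySem.Chars.find ('<' :: q) ['>'] := by
            rw [← hp2len]; exact Int.natCast_nonneg _
          have hne2 : ¬ ((i + p.length : ℕ) + PySem.Chars.find ('<' :: q) ['>'] = (-1:ℤ)) := by
            omega
          simp only [if_neg hg, if_neg hne2]
          -- p2 is nonempty and starts with '<'
          obtain ⟨q2, hp2⟩ : ∃ q2, p2 = '<' :: q2 := by
            cases p2 with
            | nil =>
              exfalso
              simp only [List.nil_append, List.cons.injEq] at hdec2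
              exact absurd hdec2.1 (by decide)
            | cons a as =>
              simp only [List.cons_append, List.cons.injEq] at hdec2
              exact ⟨as, by rw [hdec2.1]⟩
          have hq : q = q2 ++ '>' :: r := by
            cases hp2
            simpa using hdec2
          have hq2not : '>' ∉ q2 := fun hm => hp2not (hp2 ▸ List.mem_cons_of_mem _ hm)
          have hp2l : p2.length = q2.length + 1 := by rw [hp2]; simp
          have hgval : PySem.Chars.find ('<' :: q) ['>'] = ((q2.length + 1 : ℕ) : ℤ) := by
            rw [← hp2len, hp2l]
          rw [hgval]
          have e2 : (((i + p.length : ℕ):ℤ) - (i:ℤ)).toNat = p.length := by push_cast; omega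
          have e4 : (((i + p.length : ℕ):ℤ) + ((q2.length + 1 : ℕ):ℤ) + 1).toNat
              = i + p.length + q2.length + 2 := by push_cast; omega
          have e5 : (((i + p.length : ℕ):ℤ) + ((q2.length + 1 : ℕ):ℤ) + 1 - ((i + p.length : ℕ):ℤ)).toNat
              = q2.length + 2 := by push_cast; omega
          rw [e2, e4, e5, ih s (i + p.length + q2.length + 2) _ (by omega)]
          have hdropR : s.drop (i + p.length + q2.length + 2) = r := by
            have h0 : i + p.length + q2.length + 2 = (i + p.length) + (q2.length + 2) := by omega
            rw [h0, ← List.drop_drop, hdropJ, hq]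
            have h2 : '<' :: (q2 ++ '>' :: r) = ('<' :: q2 ++ ['>']) ++ r := by simp
            rw [h2]
            have h3 : ('<' :: q2 ++ ['>']).length = q2.length + 2 := by simp
            rw [← h3, List.drop_left]
          rw [hdropR, hmlt, hq, maskF_true_append q2 r hq2not]
          simp only [List.replicate_succ, List.append_assoc, List.cons_append]
          rw [cons_replicate_comm]
    · simp only [if_neg hi]
      rw [List.drop_eq_nil_of_le (by omega)]
      simp [maskF]

-- ===== VERDICT (by name: the statement is the Claim_ definition above) =====
theorem build_inside_tag_mask_py_spec : Claim_equal_build_inside_tag_mask_py := by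
  intro text _
  show _ = _
  unfold build_inside_tag_mask_py build_inside_tag_mask_py_alt
  rw [foldl_eq_maskF, altGo_eq _ _ _ _ (by omega)]
  simp
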